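-- pv_equiv track=rewrite | github.com/FPGA-Research-Manchester/FABulous | fabric/gen - Copy.py | GetFabric
-- ===== SOURCE A (Python) =====
-- def RemoveComments( list ):
-- 	output = []
--
-- 	for sublist in list:
-- 		templist = []
-- 		marker = False		# we use this marker to remember if we had an '#' element before
-- 		for item in sublist:
-- 			if item.startswith('#'):
-- 				marker = True
-- 			if not (item.startswith('#') or marker == True):
-- 				# marker = True
-- 				templist.append(item)
-- 				if item == '':
-- 					templist.remove('')
-- 		if templist != []:
-- 			output.append(templist)
-- 	return output;
--
-- def GetFabric( list ):
-- 	templist = []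
-- 	# output = []
-- 	marker = False
--
-- 	for sublist in list:
-- 		if 'FabricEnd' in sublist:
-- 			marker = False
-- 		if marker == True:
-- 			templist.append(sublist)
-- 		# we place this conditional after the append such that the 'FabricBegin' will be kicked out
-- 		if 'FabricBegin' in sublist:
-- 			marker = True
-- 	return RemoveComments(templist)
-- ===== SOURCE B (Python) =====
-- def GetFabric(list):
--     output = []
--     inside = False
--     for sublist in list:
--         if 'FabricEnd' in sublist:
--             inside = False
--         if inside:
--             kept = []
--             for item in sublist:
--                 if item.startswith('#'):
--                     break
--                 if item != '':
--                     kept.append(item)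
--             if kept:
--                 output.append(kept)
--         if 'FabricBegin' in sublist:
--             inside = True
--     return output
-- ===== Notes on version B (the rewrite author's own statement) =====
-- stated objective: simpler
-- what changed: Fused A's two-phase pipeline (collect section lines into templist, then a separate RemoveComments pass with a sticky marker and an append-then-remove dance for empty strings) into one loop that strips each in-section line inline by breaking at the first '#' item and skipping '' items.
import Mathlib
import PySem

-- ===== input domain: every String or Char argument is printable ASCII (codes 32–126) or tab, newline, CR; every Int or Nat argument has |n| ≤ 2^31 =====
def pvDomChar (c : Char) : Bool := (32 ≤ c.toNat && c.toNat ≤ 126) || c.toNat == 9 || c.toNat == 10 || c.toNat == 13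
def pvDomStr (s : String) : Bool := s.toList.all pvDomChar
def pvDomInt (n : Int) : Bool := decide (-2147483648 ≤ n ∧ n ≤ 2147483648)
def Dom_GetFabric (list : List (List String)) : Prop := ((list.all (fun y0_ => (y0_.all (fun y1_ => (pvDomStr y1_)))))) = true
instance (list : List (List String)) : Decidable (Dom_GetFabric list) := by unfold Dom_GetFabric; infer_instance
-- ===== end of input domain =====

-- B fuses A's two-phase pipeline (collect section lines, then RemoveComments) into one pass
-- that strips each in-section line inline; objective: simpler (same asymptotic cost).

-- ===== PORT A =====
-- inner loop of RemoveComments: state (templist, marker)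
def rcStep (st : List String × Bool) (item : String) : List String × Bool :=
  let marker := if PySem.Str.startswith item "#" then true else st.2
  if !(PySem.Str.startswith item "#" || marker) then
    let t := st.1 ++ [item]
    -- templist.remove('') : ValueError impossible here, '' was just appended
    let t := if item = "" then (PySem.List.remove? t "").getD t else t
    (t, marker)
  else (st.1, marker)

def RemoveComments (list : List (List String)) : List (List String) :=
  list.foldl (fun output sublist =>
    let tm := sublist.foldl rcStep ([], false)
    if tm.1 ≠ [] then output ++ [tm.1] else output) []

-- loop of GetFabric: state (templist, marker)
def gfStep (st : List (List String) × Bool) (sublist : List String) : List (List String) × Bool :=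
  let marker := if sublist.contains "FabricEnd" then false else st.2
  let templist := if marker then st.1 ++ [sublist] else st.1
  let marker := if sublist.contains "FabricBegin" then true else marker
  (templist, marker)

def GetFabric (list : List (List String)) : List (List String) :=
  RemoveComments (list.foldl gfStep ([], false)).1

-- ===== PORT B =====
-- inline strip: break at the first '#'-item, skip '' items
def stripLine : List String → List String
  | [] => []
  | item :: rest =>
    if PySem.Str.startswith item "#" then []
    else if item ≠ "" then item :: stripLine rest
    else stripLine rest

def altStep (st : List (List String) × Bool) (sublist : List String) : List (List String) × Bool :=
  let inside := if sublist.contains "FabricEnd" then false else st.2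
  let output :=
    if inside then
      let kept := stripLine sublist
      if kept ≠ [] then st.1 ++ [kept] else st.1
    else st.1
  let inside := if sublist.contains "FabricBegin" then true else inside
  (output, inside)

def GetFabric_alt (list : List (List String)) : List (List String) :=
  (list.foldl altStep ([], false)).1

-- ===== PRECONDITION & SPEC =====
def Spec_GetFabric (list : List (List String)) (out : List (List String)) : Prop := out = GetFabric_alt list
instance (list : List (List String)) (out : List (List String)) : Decidable (Spec_GetFabric list out) := by unfold Spec_GetFabric; infer_instance

-- ===== CLAIM (what is proved, stated in full; the proofs are below) =====
def Claim_equal_GetFabric : Prop := ∀ (list : List (List String)), Dom_GetFabric list → Spec_GetFabric list (GetFabric list)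

-- ===== LEMMAS AND PROOFS =====

-- once marker is true, the inner RemoveComments loop keeps templist unchanged
theorem rc_fold_true (sub : List String) (acc : List String) :
    sub.foldl rcStep (acc, true) = (acc, true) := by
  induction sub with
  | nil => rfl
  | cons item rest ih =>
    have h : rcStep (acc, true) item = (acc, true) := by
      simp [rcStep]
    simp [List.foldl_cons, h, ih]

-- the inner RemoveComments loop computes stripLine
theorem rc_fold_strip (sub : List String) (acc : List String) (h : "" ∉ acc) :
    (sub.foldl rcStep (acc, false)).1 = acc ++ stripLine sub := by
  induction sub generalizing acc with
  | nil => simp [stripLine]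
  | cons item rest ih =>
    by_cases hs : PySem.Chars.startswith item.toList ['#'] = true
    · have h1 : rcStep (acc, false) item = (acc, true) := by
        simp [rcStep, hs]
      simp [List.foldl_cons, h1, rc_fold_true, stripLine, hs]
    · by_cases he : item = ""
      · subst he
        have hmem : "" ∈ acc ++ [""] := by simp
        have hs0 : PySem.Chars.startswith ([] : List Char) ['#'] = false := by decide
        have h1 : rcStep (acc, false) "" = (acc, false) := by
          simp [rcStep, hs0, PySem.List.remove?_eq_some_erase _ _ hmem,
            List.erase_append_right _ h]
        simp [List.foldl_cons, h1, ih acc h, stripLine, hs0]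
      · have h1 : rcStep (acc, false) item = (acc ++ [item], false) := by
          simp [rcStep, hs, he]
        have h2 : "" ∉ acc ++ [item] := by
          simp [h]
          intro hc
          exact he hc
        simp [List.foldl_cons, h1, ih _ h2, stripLine, hs, he]

-- RemoveComments on an appended line = one B strip step
theorem rc_append (T : List (List String)) (s : List String) :
    RemoveComments (T ++ [s]) =
      if stripLine s ≠ [] then RemoveComments T ++ [stripLine s] else RemoveComments T := by
  unfold RemoveComments
  rw [List.foldl_append]
  simp [rc_fold_strip s [] (by simp)]

-- main invariant: RemoveComments of A's accumulated templist = B's accumulated output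
theorem main_inv (l : List (List String)) (T O : List (List String)) (m : Bool)
    (h : RemoveComments T = O) :
    RemoveComments ((l.foldl gfStep (T, m)).1) = (l.foldl altStep (O, m)).1 := by
  induction l generalizing T O m with
  | nil => simpa using h
  | cons s rest ih =>
    simp only [List.foldl_cons]
    have key : RemoveComments (gfStep (T, m) s).1 = (altStep (O, m) s).1 ∧
        (gfStep (T, m) s).2 = (altStep (O, m) s).2 := by
      by_cases hE : "FabricEnd" ∈ s <;> cases m <;>
        simp [gfStep, altStep, hE, rc_append, h]
    have h3 := ih (gfStep (T, m) s).1 (altStep (O, m) s).1 (gfStep (T, m) s).2 key.1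
    rw [Prod.mk.eta, key.2, Prod.mk.eta] at h3
    exact h3

-- ===== VERDICT (by name: the statement is the Claim_ definition above) =====
theorem GetFabric_spec : Claim_equal_GetFabric := by
  intro list _
  unfold Spec_GetFabric GetFabric GetFabric_alt
  exact main_inv list [] [] false rfl
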